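-- pv_equiv track=rewrite | github.com/sorrentini2002/SemanticMIMO-Framework | analyze_mimo_scenarios.py | analyze_parameters
-- ===== SOURCE A (Python) =====
-- from typing import Dict, Any, List, Tuple
--
-- def analyze_parameters(all_data: List[Dict[str, Any]]) -> Tuple[List[str], List[str]]:
--     all_keys = set()
--     for entry in all_data:
--         all_keys.update(entry["conditions"].keys())
--
--     param_unique_values = {k: set() for k in all_keys}
--     for entry in all_data:
--         for k, v in entry["conditions"].items():
--             param_unique_values[k].add(str(v))
--
--     hierarchy_params = [k for k, v in param_unique_values.items() if len(v) <= 1]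
--     comparison_params = [k for k, v in param_unique_values.items() if len(v) > 1]
--     return sorted(hierarchy_params), sorted(comparison_params)
-- ===== SOURCE B (Python) =====
-- from typing import Dict, Any, List, Tuple
--
-- def analyze_parameters(all_data: List[Dict[str, Any]]) -> Tuple[List[str], List[str]]:
--     rep = {}
--     multi = set()
--     for entry in all_data:
--         for k, v in entry["conditions"].items():
--             s = str(v)
--             if k not in rep:
--                 rep[k] = s
--             elif s != rep[k]:
--                 multi.add(k)
--     hierarchy_params = [k for k in rep if k not in multi]
--     comparison_params = [k for k in rep if k in multi]
--     return sorted(hierarchy_params), sorted(comparison_params)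
-- ===== Notes on version B (the rewrite author's own statement) =====
-- stated objective: simpler
-- what changed: One fused pass keeping only a first-seen representative value per key plus a set of keys seen with a second differing value, instead of A's three passes (key-collection pass, per-key value-set accumulation pass, size test).
import Mathlib
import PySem

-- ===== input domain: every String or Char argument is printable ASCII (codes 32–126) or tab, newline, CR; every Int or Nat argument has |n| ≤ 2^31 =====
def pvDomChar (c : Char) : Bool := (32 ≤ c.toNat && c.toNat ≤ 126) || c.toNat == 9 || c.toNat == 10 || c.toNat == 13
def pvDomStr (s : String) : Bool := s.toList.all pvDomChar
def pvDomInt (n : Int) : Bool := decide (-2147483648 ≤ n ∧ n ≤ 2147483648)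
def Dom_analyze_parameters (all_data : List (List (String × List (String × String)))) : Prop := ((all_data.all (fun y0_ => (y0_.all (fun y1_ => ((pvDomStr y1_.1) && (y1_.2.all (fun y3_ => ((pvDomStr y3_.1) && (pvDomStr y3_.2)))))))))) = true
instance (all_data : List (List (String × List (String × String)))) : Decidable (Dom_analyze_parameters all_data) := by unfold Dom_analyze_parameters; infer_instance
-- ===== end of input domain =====

-- B fuses A's separate passes into one pass keeping a first-seen representative value per key plus
-- the set of keys seen with a second differing value (objective: simpler state, same results).

-- entry["conditions"] (both Pythons perform this exact lookup; total via getD, Pre_ guarantees the key)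
def pvConds (entry : List (String × List (String × String))) : List (String × String) :=
  (PySem.Dict.mk entry).getD "conditions" []

-- ===== PORT A =====
def analyze_parameters (all_data : List (List (String × List (String × String)))) : List String × List String :=
  let all_keys : PySem.Set String :=
    all_data.foldl (fun s entry => PySem.Set.update s (PySem.Dict.keys (PySem.Dict.mk (pvConds entry)))) PySem.Set.empty
  let puv0 : PySem.Dict String (PySem.Set String) :=
    all_keys.foldl (fun d k => d.insert k PySem.Set.empty) PySem.Dict.empty
  let puv : PySem.Dict String (PySem.Set String) :=
    all_data.foldl (fun d entry =>
      (PySem.Dict.mk (pvConds entry)).items.foldl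
        (fun d kv => d.modify kv.1 PySem.Set.empty (fun s => PySem.Set.add s kv.2)) d) puv0
  let hierarchy_params : List String := ((puv.items.filter (fun kv => kv.2.length ≤ 1)).map (·.1))
  let comparison_params : List String := ((puv.items.filter (fun kv => 1 < kv.2.length)).map (·.1))
  (PySem.List.sorted hierarchy_params (fun x => x) false,
   PySem.List.sorted comparison_params (fun x => x) false)

-- ===== PORT B =====
def analyze_parameters_alt (all_data : List (List (String × List (String × String)))) : List String × List String :=
  let st : PySem.Dict String String × PySem.Set String :=
    all_data.foldl (fun st entry =>
      (PySem.Dict.mk (pvConds entry)).items.foldl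
        (fun st kv =>
          if st.1.contains kv.1 = false then (st.1.insert kv.1 kv.2, st.2)
          else if kv.2 ≠ st.1.getD kv.1 "" then (st.1, PySem.Set.add st.2 kv.1)
          else st) st)
      (PySem.Dict.empty, PySem.Set.empty)
  let rep := st.1
  let multi := st.2
  let hierarchy_params : List String := rep.keys.filter (fun k => !(PySem.Set.contains multi k))
  let comparison_params : List String := rep.keys.filter (fun k => PySem.Set.contains multi k)
  (PySem.List.sorted hierarchy_params (fun x => x) false,
   PySem.List.sorted comparison_params (fun x => x) false)

-- ===== PRECONDITION & SPEC =====
-- Pre_ excludes exactly the entries without a "conditions" key, on which A raises KeyError.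
def Pre_analyze_parameters (all_data : List (List (String × List (String × String)))) : Prop :=
  ∀ entry ∈ all_data, "conditions" ∈ entry.map Prod.fst
instance (all_data : List (List (String × List (String × String)))) : Decidable (Pre_analyze_parameters all_data) := by unfold Pre_analyze_parameters; infer_instance

def pvWitness_analyze_parameters : (List (List (String × List (String × String)))) :=
  [[("conditions", [("snr", "10"), ("mod", "qam")])], [("conditions", [("snr", "20")])]]

def Spec_analyze_parameters (all_data : List (List (String × List (String × String)))) (out : List String × List String) : Prop := out = analyze_parameters_alt all_data
instance (all_data : List (List (String × List (String × String)))) (out : List String × List String) : Decidable (Spec_analyze_parameters all_data out) := by unfold Spec_analyze_parameters; infer_instance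

-- ===== CLAIM (what is proved, stated in full; the proofs are below) =====
def Claim_equal_analyze_parameters : Prop := ∀ (all_data : List (List (String × List (String × String)))), Dom_analyze_parameters all_data → Pre_analyze_parameters all_data → Spec_analyze_parameters all_data (analyze_parameters all_data)

-- ===== LEMMAS AND PROOFS =====

-- the flattened stream of (key, value) pairs both programs consume
def pvPairs (all_data : List (List (String × List (String × String)))) : List (String × String) :=
  (all_data.map pvConds).flatten

-- the values recorded for key k, in stream order
def pvVals (ps : List (String × String)) (k : String) : List String :=
  (ps.filter (fun p => p.1 == k)).map (·.2)

-- the first value recorded for key k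
def pvFirst (ps : List (String × String)) (k : String) : Option String :=
  (ps.find? (fun p => p.1 == k)).map (·.2)

-- A's inner loop body, named for the proofs (syntactically the lambda in analyze_parameters)
def pvStepA (d : PySem.Dict String (PySem.Set String)) (kv : String × String) :
    PySem.Dict String (PySem.Set String) :=
  d.modify kv.1 PySem.Set.empty (fun s => PySem.Set.add s kv.2)

-- B's loop body, named for the proofs (syntactically the lambda in analyze_parameters_alt)
def pvStepB (st : PySem.Dict String String × PySem.Set String) (kv : String × String) :
    PySem.Dict String String × PySem.Set String :=
  if st.1.contains kv.1 = false then (st.1.insert kv.1 kv.2, st.2)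
  else if kv.2 ≠ st.1.getD kv.1 "" then (st.1, PySem.Set.add st.2 kv.1)
  else st

lemma pvL1 (l : List (List (String × List (String × String)))) (s : PySem.Set String) :
    l.foldl (fun s entry => PySem.Set.update s (PySem.Dict.keys (PySem.Dict.mk (pvConds entry)))) s
      = PySem.Set.update s ((l.map pvConds).flatten.map (·.1)) := by
  induction l generalizing s with
  | nil => simp [PySem.Set.update_nil]
  | cons e l ih =>
      rw [List.foldl_cons, ih]
      simp [List.map_append, PySem.Set.update_append, PySem.Dict.keys_mk]

lemma pvL2 (ks : List String) (d : PySem.Dict String (PySem.Set String))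
    (h : ∀ k, d.getD k PySem.Set.empty = PySem.Set.empty) (k : String) :
    (ks.foldl (fun d k => d.insert k PySem.Set.empty) d).getD k PySem.Set.empty = PySem.Set.empty := by
  induction ks generalizing d with
  | nil => exact h k
  | cons x ks ih =>
      refine ih _ (fun k' => ?_)
      rw [PySem.Dict.getD_insert]
      split
      · rfl
      · exact h _

lemma pvL3 (l : List (String × String)) (d : PySem.Dict String (PySem.Set String)) (k : String) :
    (l.foldl pvStepA d).getD k PySem.Set.empty
      = PySem.Set.update (d.getD k PySem.Set.empty) (pvVals l k) := by
  induction l generalizing d with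
  | nil => simp [pvVals, PySem.Set.update_nil]
  | cons p l ih =>
      rw [List.foldl_cons, ih]
      by_cases hk : p.1 = k
      · simp [pvVals, pvStepA, hk, PySem.Set.update_cons]
      · simp only [pvVals, pvStepA, List.filter_cons, PySem.Dict.getD_modify]
        rw [if_neg (fun h => hk h.symm), if_neg (by simpa using hk)]

lemma pvL5 (s : PySem.Set String) (xs : List String) (h : ∀ x ∈ xs, x ∈ s) :
    PySem.Set.update s xs = s := by
  rw [PySem.Set.update_eq_append_filter]
  have hnil : List.filter (fun y => !s.contains y) (PySem.Set.ofList xs) = [] := by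
    rw [List.filter_eq_nil_iff]
    intro y hy
    simpa using h y ((PySem.Set.mem_ofList xs y).1 hy)
  rw [hnil, List.append_nil]

lemma pvFirst_append (l : List (String × String)) (p : String × String) (k : String) :
    pvFirst (l ++ [p]) k = (pvFirst l k).or (if p.1 = k then some p.2 else none) := by
  by_cases h : p.1 = k <;>
    simp [pvFirst, List.find?_append, h]

lemma pvFirst_isSome (l : List (String × String)) (k : String) :
    (pvFirst l k).isSome ↔ ∃ q ∈ l, q.1 = k := by
  simp [pvFirst, List.find?_isSome]

lemma pvFirst_append_of_isSome (l : List (String × String)) (p : String × String) (k : String)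
    (h : (pvFirst l k).isSome) : pvFirst (l ++ [p]) k = pvFirst l k := by
  rw [pvFirst_append]
  obtain ⟨w, hw⟩ := Option.isSome_iff_exists.1 h
  simp [hw]

lemma pvFirst_append_of_ne (l : List (String × String)) (p : String × String) (k : String)
    (h : p.1 ≠ k) : pvFirst (l ++ [p]) k = pvFirst l k := by
  rw [pvFirst_append, if_neg h, Option.or_none]

-- B's loop invariant: rep holds the first value seen per key (keys in first-insertion order),
-- multi holds exactly the keys seen with a value differing from their first
lemma pvL7 (ps : List (String × String)) :
    (∀ k, (ps.foldl pvStepB (PySem.Dict.empty, PySem.Set.empty)).1.get? k = pvFirst ps k)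
    ∧ (ps.foldl pvStepB (PySem.Dict.empty, PySem.Set.empty)).1.keys = PySem.Set.ofList (ps.map (·.1))
    ∧ (∀ k, k ∈ (ps.foldl pvStepB (PySem.Dict.empty, PySem.Set.empty)).2
        ↔ ∃ p ∈ ps, p.1 = k ∧ some p.2 ≠ pvFirst ps k) := by
  induction ps using List.reverseRecOn with
  | nil =>
      exact ⟨fun k => rfl, rfl, fun k => by simp⟩
  | append_singleton l p ih =>
      obtain ⟨ih1, ih2, ih3⟩ := ih
      rw [List.foldl_append] at *
      set st := l.foldl pvStepB (PySem.Dict.empty, PySem.Set.empty) with hst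
      by_cases hc : (pvFirst l p.1).isSome
      · -- key already present
        obtain ⟨w, hw⟩ := Option.isSome_iff_exists.1 hc
        have hcont : st.1.contains p.1 = true := by
          rw [PySem.Dict.contains_eq_isSome_get?, ih1, hw]; rfl
        have hgetD : st.1.getD p.1 "" = w := PySem.Dict.getD_of_get?_eq_some st.1 "" (by rw [ih1, hw])
        have hfirst : ∀ k, pvFirst (l ++ [p]) k = pvFirst l k := by
          intro k
          by_cases hk : p.1 = k
          · exact pvFirst_append_of_isSome l p k (hk ▸ hc)
          · exact pvFirst_append_of_ne l p k hk
        have hkeys : PySem.Set.ofList ((l ++ [p]).map (·.1)) = st.1.keys := by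
          have hm : p.1 ∈ PySem.Set.ofList (l.map (·.1)) := by
            rw [PySem.Set.mem_ofList]
            obtain ⟨q, hq, hq1⟩ := (pvFirst_isSome l p.1).1 hc
            exact List.mem_map.2 ⟨q, hq, hq1⟩
          simp only [List.map_append, List.map_cons, List.map_nil]
          rw [PySem.Set.ofList_append_singleton, PySem.Set.add_of_mem hm, ih2]
        by_cases hv : p.2 = w
        · -- same value: state unchanged
          have hstep : List.foldl pvStepB st [p] = st := by
            simp [pvStepB, hcont, hgetD, hv]
          rw [hstep]
          refine ⟨fun k => by rw [ih1, hfirst], by rw [hkeys, ih2], fun k => ?_⟩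
          rw [ih3]
          constructor
          · rintro ⟨q, hq, hq1, hq2⟩
            exact ⟨q, by simp [hq], hq1, by rw [hfirst]; exact hq2⟩
          · rintro ⟨q, hq, hq1, hq2⟩
            rcases List.mem_append.1 hq with hql | hqp
            · exact ⟨q, hql, hq1, by rw [← hfirst]; exact hq2⟩
            · exfalso
              have hqe : q = p := by simpa using hqp
              subst hqe; subst hq1
              rw [hfirst, hw] at hq2
              exact hq2 (by rw [hv])
        · -- differing value: key joins multi
          have hstep : List.foldl pvStepB st [p] = (st.1, PySem.Set.add st.2 p.1) := by
            simp [pvStepB, hcont, hgetD, hv]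
          rw [hstep]
          refine ⟨fun k => by rw [ih1, hfirst], by rw [hkeys, ih2], fun k => ?_⟩
          rw [PySem.Set.mem_add, ih3]
          constructor
          · rintro (⟨q, hq, hq1, hq2⟩ | hk)
            · exact ⟨q, by simp [hq], hq1, by rw [hfirst]; exact hq2⟩
            · subst hk
              exact ⟨p, by simp, rfl, by rw [hfirst, hw]; simp [hv]⟩
          · rintro ⟨q, hq, hq1, hq2⟩
            rcases List.mem_append.1 hq with hql | hqp
            · exact Or.inl ⟨q, hql, hq1, by rw [← hfirst]; exact hq2⟩
            · have hqe : q = p := by simpa using hqp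
              subst hqe
              exact Or.inr hq1.symm
      · -- fresh key
        have hnone : pvFirst l p.1 = none := Option.not_isSome_iff_eq_none.1 hc
        have hcont : st.1.contains p.1 = false := by
          rw [PySem.Dict.contains_eq_isSome_get?, ih1, hnone]; rfl
        have hstep : List.foldl pvStepB st [p] = (st.1.insert p.1 p.2, st.2) := by
          simp [pvStepB, hcont]
        rw [hstep]
        have hfirstp : pvFirst (l ++ [p]) p.1 = some p.2 := by
          rw [pvFirst_append, hnone, if_pos rfl]; rfl
        have hfirstne : ∀ k, p.1 ≠ k → pvFirst (l ++ [p]) k = pvFirst l k :=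
          fun k hk => pvFirst_append_of_ne l p k hk
        refine ⟨fun k => ?_, ?_, fun k => ?_⟩
        · rw [PySem.Dict.get?_insert]
          by_cases hk : k = p.1
          · subst hk; rw [if_pos rfl, hfirstp]
          · rw [if_neg hk, ih1, hfirstne k (fun h => hk h.symm)]
        · have hnm : p.1 ∉ PySem.Set.ofList (l.map (·.1)) := by
            rw [PySem.Set.mem_ofList]
            intro hmem
            obtain ⟨q, hq, hq1⟩ := List.mem_map.1 hmem
            exact hc ((pvFirst_isSome l p.1).2 ⟨q, hq, hq1⟩)
          rw [PySem.Dict.keys_insert_of_not_contains _ _ hcont, ih2]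
          simp only [List.map_append, List.map_cons, List.map_nil]
          rw [PySem.Set.ofList_append_singleton, PySem.Set.add_of_not_mem hnm]
        · rw [ih3]
          constructor
          · rintro ⟨q, hq, hq1, hq2⟩
            have hqs : (pvFirst l k).isSome := (pvFirst_isSome l k).2 ⟨q, hq, hq1⟩
            exact ⟨q, by simp [hq], hq1, by rw [pvFirst_append_of_isSome l p k hqs]; exact hq2⟩
          · rintro ⟨q, hq, hq1, hq2⟩
            rcases List.mem_append.1 hq with hql | hqp
            · have hqs : (pvFirst l k).isSome := (pvFirst_isSome l k).2 ⟨q, hql, hq1⟩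
              exact ⟨q, hql, hq1, by rw [← pvFirst_append_of_isSome l p k hqs]; exact hq2⟩
            · exfalso
              have hqe : q = p := by simpa using hqp
              subst hqe; subst hq1
              rw [hfirstp] at hq2
              exact hq2 rfl

lemma pvFirst_eq_head? (ps : List (String × String)) (k : String) :
    pvFirst ps k = (pvVals ps k).head? := by
  rw [pvFirst, pvVals, List.head?_map, List.head?_filter]

lemma pvMemVals (ps : List (String × String)) (k : String) (v : String) :
    v ∈ pvVals ps k ↔ ∃ p ∈ ps, p.1 = k ∧ p.2 = v := by
  simp [pvVals, List.mem_map, List.mem_filter]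

-- the classification bridge: "a second differing value was seen" ↔ "more than one distinct value"
lemma pvL8 (ps : List (String × String)) (k : String) (hk : ∃ p ∈ ps, p.1 = k) :
    (∃ p ∈ ps, p.1 = k ∧ some p.2 ≠ pvFirst ps k)
      ↔ ¬ ((PySem.Set.ofList (pvVals ps k)).length ≤ 1) := by
  have hLHS : (∃ p ∈ ps, p.1 = k ∧ some p.2 ≠ pvFirst ps k)
      ↔ ∃ v ∈ pvVals ps k, some v ≠ (pvVals ps k).head? := by
    rw [← pvFirst_eq_head?]
    constructor
    · rintro ⟨p, hp, hp1, hp2⟩; exact ⟨p.2, (pvMemVals ps k p.2).2 ⟨p, hp, hp1, rfl⟩, hp2⟩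
    · rintro ⟨v, hv, hv2⟩
      obtain ⟨p, hp, hp1, hpv⟩ := (pvMemVals ps k v).1 hv
      exact ⟨p, hp, hp1, hpv ▸ hv2⟩
  rw [hLHS]
  obtain ⟨p, hp, hp1⟩ := hk
  have hne : pvVals ps k ≠ [] := by
    intro h
    have : p.2 ∈ pvVals ps k := (pvMemVals ps k p.2).2 ⟨p, hp, hp1, rfl⟩
    simp [h] at this
  obtain ⟨v0, rest, hvr⟩ := List.exists_cons_of_ne_nil hne
  rw [hvr]
  rw [PySem.Set.ofList_cons]
  have hlen : (v0 :: (PySem.Set.ofList rest).discard v0).length ≤ 1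
      ↔ (PySem.Set.ofList rest).discard v0 = [] := by
    simp [List.length_eq_zero_iff]
  rw [hlen]
  rw [List.eq_nil_iff_forall_not_mem]
  constructor
  · rintro ⟨v, hv, hvne⟩ hall
    rcases List.mem_cons.1 hv with h | h
    · exact hvne (by simp [h])
    · exact hall v ((PySem.Set.mem_discard _ _ _).2 ⟨(PySem.Set.mem_ofList rest v).2 h,
        fun he => hvne (by simp [he])⟩)
  · intro hnall
    obtain ⟨v, hv⟩ := not_forall.1 hnall
    rw [not_not] at hv
    obtain ⟨hv1, hv2⟩ := (PySem.Set.mem_discard _ _ _).1 hv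
    exact ⟨v, List.mem_cons_of_mem v0 ((PySem.Set.mem_ofList rest v).1 hv1),
      by simpa using hv2⟩

-- A's accumulated dict, characterised: its items are the distinct keys in first-appearance order,
-- each with the set of its values
lemma pvPuvItems (all_data : List (List (String × List (String × String)))) :
    (all_data.foldl (fun d entry =>
      (PySem.Dict.mk (pvConds entry)).items.foldl
        (fun d kv => d.modify kv.1 PySem.Set.empty (fun s => PySem.Set.add s kv.2)) d)
      ((all_data.foldl (fun s entry => PySem.Set.update s (PySem.Dict.keys (PySem.Dict.mk (pvConds entry)))) PySem.Set.empty).foldl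
        (fun d k => d.insert k PySem.Set.empty) PySem.Dict.empty)).items
    = (PySem.Set.ofList ((pvPairs all_data).map (·.1))).map
        (fun k => (k, PySem.Set.ofList (pvVals (pvPairs all_data) k))) := by
  have hK : all_data.foldl (fun s entry => PySem.Set.update s (PySem.Dict.keys (PySem.Dict.mk (pvConds entry)))) PySem.Set.empty
      = PySem.Set.ofList ((pvPairs all_data).map (·.1)) := by
    rw [pvL1, PySem.Set.update_empty]; rfl
  rw [hK]
  have hO : all_data.foldl (fun d entry =>
        (PySem.Dict.mk (pvConds entry)).items.foldl
          (fun d kv => d.modify kv.1 PySem.Set.empty (fun s => PySem.Set.add s kv.2)) d)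
        ((PySem.Set.ofList ((pvPairs all_data).map (·.1))).foldl
          (fun d k => d.insert k PySem.Set.empty) PySem.Dict.empty)
      = (pvPairs all_data).foldl pvStepA
        ((PySem.Set.ofList ((pvPairs all_data).map (·.1))).foldl
          (fun d k => d.insert k PySem.Set.empty) PySem.Dict.empty) := by
    rw [pvPairs, List.foldl_flatten, List.foldl_map]
    rfl
  rw [hO]
  set K := PySem.Set.ofList ((pvPairs all_data).map (·.1)) with hKdef
  set puv0 := K.foldl (fun d k => d.insert k PySem.Set.empty)
    (PySem.Dict.empty : PySem.Dict String (PySem.Set String)) with hpuv0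
  have hpuv0keys : puv0.keys = K := by
    rw [hpuv0, PySem.Dict.keys_foldl_insert K (fun _ _ => PySem.Set.empty) PySem.Dict.empty]
    show PySem.Set.update PySem.Set.empty K = K
    rw [PySem.Set.update_empty, hKdef, PySem.Set.ofList_ofList]
  have hnd0 : puv0.keys.Nodup := by rw [hpuv0keys, hKdef]; exact PySem.Set.nodup_ofList _
  have hkeys : ((pvPairs all_data).foldl pvStepA puv0).keys = K := by
    show ((pvPairs all_data).foldl (fun d p =>
      d.modify p.1 PySem.Set.empty (fun s => PySem.Set.add s p.2)) puv0).keys = K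
    rw [PySem.Dict.keys_foldl_modify_key (pvPairs all_data) (fun p => p.1) PySem.Set.empty
      (fun _ p s => PySem.Set.add s p.2) puv0, hpuv0keys]
    exact pvL5 K _ (fun x hx => by rw [hKdef, PySem.Set.mem_ofList]; simpa using hx)
  have hnd : ((pvPairs all_data).foldl pvStepA puv0).keys.Nodup := by
    show ((pvPairs all_data).foldl (fun d p =>
      d.modify p.1 PySem.Set.empty (fun s => PySem.Set.add s p.2)) puv0).keys.Nodup
    exact PySem.Dict.nodup_keys_foldl_modify_key (pvPairs all_data) (fun p => p.1)
      PySem.Set.empty (fun _ p s => PySem.Set.add s p.2) puv0 hnd0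
  have hgetD : ∀ k, ((pvPairs all_data).foldl pvStepA puv0).getD k PySem.Set.empty
      = PySem.Set.ofList (pvVals (pvPairs all_data) k) := by
    intro k
    rw [pvL3]
    have h0 : puv0.getD k PySem.Set.empty = PySem.Set.empty :=
      pvL2 K PySem.Dict.empty (fun k' => PySem.Dict.getD_empty k' _) k
    rw [h0, PySem.Set.update_empty]
  rw [PySem.Dict.items_eq_map_keys _ hnd PySem.Set.empty, hkeys]
  exact List.map_congr_left (fun k _ => by rw [hgetD k])

lemma pvA_eq (all_data : List (List (String × List (String × String)))) :
    analyze_parameters all_data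
      = (PySem.List.sorted ((PySem.Set.ofList ((pvPairs all_data).map (·.1))).filter
            (fun k => decide ((PySem.Set.ofList (pvVals (pvPairs all_data) k)).length ≤ 1))) (fun x => x) false,
         PySem.List.sorted ((PySem.Set.ofList ((pvPairs all_data).map (·.1))).filter
            (fun k => decide (1 < (PySem.Set.ofList (pvVals (pvPairs all_data) k)).length))) (fun x => x) false) := by
  simp only [analyze_parameters]
  rw [pvPuvItems all_data]
  simp [List.filter_map, List.map_map, Function.comp_def]

lemma pvB_eq (all_data : List (List (String × List (String × String)))) :
    analyze_parameters_alt all_data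
      = (PySem.List.sorted ((PySem.Set.ofList ((pvPairs all_data).map (·.1))).filter
            (fun k => decide ((PySem.Set.ofList (pvVals (pvPairs all_data) k)).length ≤ 1))) (fun x => x) false,
         PySem.List.sorted ((PySem.Set.ofList ((pvPairs all_data).map (·.1))).filter
            (fun k => decide (1 < (PySem.Set.ofList (pvVals (pvPairs all_data) k)).length))) (fun x => x) false) := by
  simp only [analyze_parameters_alt]
  have hB : all_data.foldl (fun st entry =>
        (PySem.Dict.mk (pvConds entry)).items.foldl
          (fun st kv =>
            if st.1.contains kv.1 = false then (st.1.insert kv.1 kv.2, st.2)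
            else if kv.2 ≠ st.1.getD kv.1 "" then (st.1, PySem.Set.add st.2 kv.1)
            else st) st)
        ((PySem.Dict.empty : PySem.Dict String String), (PySem.Set.empty : PySem.Set String))
      = (pvPairs all_data).foldl pvStepB (PySem.Dict.empty, PySem.Set.empty) := by
    rw [pvPairs, List.foldl_flatten, List.foldl_map]
    rfl
  rw [hB]
  obtain ⟨h1, h2, h3⟩ := pvL7 (pvPairs all_data)
  rw [h2]
  set ps := pvPairs all_data with hps
  set st := ps.foldl pvStepB (PySem.Dict.empty, PySem.Set.empty) with hstdef
  have hmem : ∀ k ∈ PySem.Set.ofList (ps.map (·.1)),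
      (k ∈ st.2 ↔ ¬ ((PySem.Set.ofList (pvVals ps k)).length ≤ 1)) := by
    intro k hk
    have hex : ∃ p ∈ ps, p.1 = k := by
      rw [PySem.Set.mem_ofList] at hk
      obtain ⟨q, hq, hq1⟩ := List.mem_map.1 hk
      exact ⟨q, hq, hq1⟩
    exact (h3 k).trans (pvL8 ps k hex)
  have hf1 : ∀ k ∈ PySem.Set.ofList (ps.map (·.1)),
      (!(PySem.Set.contains st.2 k)) = decide ((PySem.Set.ofList (pvVals ps k)).length ≤ 1) := by
    intro k hk
    rw [Bool.eq_iff_iff]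
    simp only [Bool.not_eq_true', decide_eq_true_eq]
    constructor
    · intro hfalse
      by_contra hgt
      have : k ∈ st.2 := (hmem k hk).2 hgt
      rw [(PySem.Set.contains_iff st.2 k).2 this] at hfalse
      simp at hfalse
    · intro hle
      by_contra hne
      have htrue : PySem.Set.contains st.2 k = true := by
        cases hct : PySem.Set.contains st.2 k
        · exact absurd hct hne
        · rfl
      exact ((hmem k hk).1 ((PySem.Set.contains_iff st.2 k).1 htrue)) hle
  have hf2 : ∀ k ∈ PySem.Set.ofList (ps.map (·.1)),
      PySem.Set.contains st.2 k = decide (1 < (PySem.Set.ofList (pvVals ps k)).length) := by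
    intro k hk
    rw [Bool.eq_iff_iff]
    simp only [decide_eq_true_eq]
    rw [PySem.Set.contains_iff st.2 k, hmem k hk]
    omega
  rw [List.filter_congr hf1, List.filter_congr hf2]

-- ===== VERDICT (by name: the statement is the Claim_ definition above) =====
theorem analyze_parameters_spec : Claim_equal_analyze_parameters := by
  intro all_data _ _
  unfold Spec_analyze_parameters
  rw [pvA_eq, pvB_eq]
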